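-- pv_equiv track=rewrite | github.com/GrahamArdent/PROGRAMSTART | scripts/programstart_recommend.py | actionability_follow_up_commands
-- ===== SOURCE A (Python) =====
-- def actionability_follow_up_commands(actionability_summary: list[dict[str, str]]) -> list[str]:
--     commands: list[str] = []
--     if any(item.get("actionability") == "advice-only" for item in actionability_summary):
--         commands.append(
--             "Review outputs/factory/create-plan.md to confirm stack, rule, and architecture guidance before implementation"
--         )
--     if any(item.get("actionability") == "automation-supported" for item in actionability_summary):
--         commands.append(
--             "Review outputs/factory/provisioning-plan.md and execute automation-supported provisioning before manual setup"
--         )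
--     if any(item.get("actionability") == "manual-setup" for item in actionability_summary):
--         commands.append("Use outputs/factory/setup-surface.md to complete manual CLI installs, auth steps, and API env wiring")
--     return commands
-- ===== SOURCE B (Python) =====
-- _COMMANDS = [
--     "Review outputs/factory/create-plan.md to confirm stack, rule, and architecture guidance before implementation",
--     "Review outputs/factory/provisioning-plan.md and execute automation-supported provisioning before manual setup",
--     "Use outputs/factory/setup-surface.md to complete manual CLI installs, auth steps, and API env wiring",
-- ]
--
--
-- def actionability_follow_up_commands(actionability_summary: list[dict[str, str]]) -> list[str]:
--     # One pass: fold the categories seen into a 3-bit mask, then decode the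
--     # mask positionally against the ordered command list.
--     mask = 0
--     for item in actionability_summary:
--         value = item.get("actionability")
--         if value == "advice-only":
--             mask |= 1
--         elif value == "automation-supported":
--             mask |= 2
--         elif value == "manual-setup":
--             mask |= 4
--     return [cmd for i, cmd in enumerate(_COMMANDS) if (mask >> i) & 1]
-- ===== Notes on version B (the rewrite author's own statement) =====
-- stated objective: alternative
-- what changed: Replaces three separate any()-scans over the summary with a single pass folding the categories seen into a 3-bit integer mask, then decodes the mask positionally against the ordered command list.
import Mathlib
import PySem

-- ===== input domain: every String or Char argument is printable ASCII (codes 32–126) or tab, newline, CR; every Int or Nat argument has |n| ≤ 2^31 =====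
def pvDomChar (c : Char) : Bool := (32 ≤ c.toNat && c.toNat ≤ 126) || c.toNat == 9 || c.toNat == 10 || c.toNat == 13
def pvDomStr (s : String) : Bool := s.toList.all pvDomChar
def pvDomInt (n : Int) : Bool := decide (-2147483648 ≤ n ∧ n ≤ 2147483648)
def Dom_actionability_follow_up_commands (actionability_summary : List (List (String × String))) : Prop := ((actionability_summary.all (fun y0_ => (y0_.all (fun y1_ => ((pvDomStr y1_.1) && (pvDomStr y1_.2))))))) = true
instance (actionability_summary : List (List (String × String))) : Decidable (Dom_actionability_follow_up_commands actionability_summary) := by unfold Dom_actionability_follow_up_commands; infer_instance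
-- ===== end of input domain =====

-- B folds the categories seen into a 3-bit mask in one pass and decodes it positionally against the ordered command list; alternative decomposition, same cost.


-- ===== PORT A =====
def actionability_follow_up_commands (actionability_summary : List (List (String × String))) : List String :=
  let commands : List String := []
  let commands := if actionability_summary.any
      (fun item => PySem.Dict.get? (PySem.Dict.mk item) "actionability" == some "advice-only") then
    commands ++ ["Review outputs/factory/create-plan.md to confirm stack, rule, and architecture guidance before implementation"] else commands
  let commands := if actionability_summary.any
      (fun item => PySem.Dict.get? (PySem.Dict.mk item) "actionability" == some "automation-supported") then
    commands ++ ["Review outputs/factory/provisioning-plan.md and execute automation-supported provisioning before manual setup"] else commands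
  let commands := if actionability_summary.any
      (fun item => PySem.Dict.get? (PySem.Dict.mk item) "actionability" == some "manual-setup") then
    commands ++ ["Use outputs/factory/setup-surface.md to complete manual CLI installs, auth steps, and API env wiring"] else commands
  commands

-- ===== PORT B =====
-- B: one fold over the summary builds a 3-bit mask of the categories seen
-- (mask is a nonnegative Python int, so Nat bitwise ops are exact);
-- the ordered command list is then decoded positionally by the mask's bits.
def pvCommands : List String :=
  ["Review outputs/factory/create-plan.md to confirm stack, rule, and architecture guidance before implementation",
   "Review outputs/factory/provisioning-plan.md and execute automation-supported provisioning before manual setup",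
   "Use outputs/factory/setup-surface.md to complete manual CLI installs, auth steps, and API env wiring"]

def pvMaskStep (mask : Nat) (item : List (String × String)) : Nat :=
  -- Source B binds value = item.get("actionability") once; inlining the pure lookup is value-identical
  if PySem.Dict.get? (PySem.Dict.mk item) "actionability" == some "advice-only" then mask ||| 1
  else if PySem.Dict.get? (PySem.Dict.mk item) "actionability" == some "automation-supported" then mask ||| 2
  else if PySem.Dict.get? (PySem.Dict.mk item) "actionability" == some "manual-setup" then mask ||| 4
  else mask

def pvMask (actionability_summary : List (List (String × String))) : Nat :=
  actionability_summary.foldl pvMaskStep 0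

def actionability_follow_up_commands_alt (actionability_summary : List (List (String × String))) : List String :=
  let mask := pvMask actionability_summary
  (pvCommands.zipIdx.filter (fun p => (mask >>> p.2) &&& 1 ≠ 0)).map (fun p => p.1)

-- ===== PRECONDITION & SPEC =====
def Spec_actionability_follow_up_commands (actionability_summary : List (List (String × String))) (out : List String) : Prop := out = actionability_follow_up_commands_alt actionability_summary
instance (actionability_summary : List (List (String × String))) (out : List String) : Decidable (Spec_actionability_follow_up_commands actionability_summary out) := by unfold Spec_actionability_follow_up_commands; infer_instance

-- ===== CLAIM (what is proved, stated in full; the proofs are below) =====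
def Claim_equal_actionability_follow_up_commands : Prop := ∀ (actionability_summary : List (List (String × String))), Dom_actionability_follow_up_commands actionability_summary → Spec_actionability_follow_up_commands actionability_summary (actionability_follow_up_commands actionability_summary)

-- ===== LEMMAS AND PROOFS =====
-- The mask fold started from m equals m ||| the fold started from 0.
theorem pvMask_go (s : List (List (String × String))) (m : Nat) :
    s.foldl pvMaskStep m = m ||| pvMask s := by
  induction s generalizing m with
  | nil => simp [pvMask]
  | cons a t ih =>
    rw [pvMask, List.foldl_cons, List.foldl_cons, ih (pvMaskStep m a)]
    conv_rhs => rw [ih (pvMaskStep 0 a)]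
    unfold pvMaskStep
    split_ifs <;> simp [Nat.zero_or, Nat.or_assoc]

-- Each bit of the mask equals A's any-scan for the corresponding category.
theorem pvMask_bit (s : List (List (String × String))) (c : String) (i : Nat)
    (hc : (c = "advice-only" ∧ i = 0) ∨ (c = "automation-supported" ∧ i = 1) ∨
          (c = "manual-setup" ∧ i = 2)) :
    (pvMask s).testBit i = s.any (fun item => PySem.Dict.get? (PySem.Dict.mk item) "actionability" == some c) := by
  induction s with
  | nil =>
    rcases hc with ⟨_, rfl⟩ | ⟨_, rfl⟩ | ⟨_, rfl⟩ <;> simp [pvMask]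
  | cons a t ih =>
    rw [pvMask, List.foldl_cons, pvMask_go t (pvMaskStep 0 a), Nat.testBit_or, ih,
        List.any_cons]
    unfold pvMaskStep
    rcases hc with ⟨rfl, rfl⟩ | ⟨rfl, rfl⟩ | ⟨rfl, rfl⟩ <;>
      (split_ifs with h1 h2 h3 <;> simp_all) <;>
        first
          | exact Or.inl (by decide)
          | (intro h; exact absurd h (by decide))

theorem bit_iff (m i : Nat) : ((m >>> i) &&& 1 ≠ 0) = (m.testBit i = true) := by
  simp [Nat.testBit, Nat.and_comm]

-- ===== VERDICT (by name: the statement is the Claim_ definition above) =====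
theorem actionability_follow_up_commands_spec : Claim_equal_actionability_follow_up_commands := by
  intro s _
  unfold Spec_actionability_follow_up_commands
  unfold actionability_follow_up_commands actionability_follow_up_commands_alt
  rw [show pvCommands.zipIdx =
      [("Review outputs/factory/create-plan.md to confirm stack, rule, and architecture guidance before implementation", 0),
       ("Review outputs/factory/provisioning-plan.md and execute automation-supported provisioning before manual setup", 1),
       ("Use outputs/factory/setup-surface.md to complete manual CLI installs, auth steps, and API env wiring", 2)] from rfl]
  simp only [List.filter_cons, List.filter_nil, decide_eq_true_eq, bit_iff]
  rw [pvMask_bit s "advice-only" 0 (Or.inl ⟨rfl, rfl⟩),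
      pvMask_bit s "automation-supported" 1 (Or.inr (Or.inl ⟨rfl, rfl⟩)),
      pvMask_bit s "manual-setup" 2 (Or.inr (Or.inr ⟨rfl, rfl⟩))]
  split_ifs <;> rfl
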